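-- pv_equiv track=rewrite | github.com/lostSou1s/Urfu_Python | Buns/Mod3/task9.py | get_loc
-- ===== SOURCE A (Python) =====
-- def get_loc(N):
--     direct = [(0, 1), (-1, 0), (0, -1), (1, 0)]
--     current_dir = 0
--     x, y = 0, 0
--
--     for i in range(1, N+1):
--         direction = direct[current_dir % 4]
--         x += direction[0]
--         y += direction[1]
--
--         if (i % 2 == 0) and (i // 2 % 4 == 0 or i // 2 % 4 == 2):
--             current_dir = (current_dir + 1) % 4
--
--     return (x, y)
-- ===== SOURCE B (Python) =====
-- # O(1): the walk is periodic with period 16 and zero net displacement per period,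
-- # so the final position is a table lookup at N mod 16 (origin for non-positive N).
-- _TABLE = [(0, 0), (0, 1), (0, 2), (0, 3), (0, 4), (-1, 4), (-2, 4), (-3, 4),
--           (-4, 4), (-4, 3), (-4, 2), (-4, 1), (-4, 0), (-3, 0), (-2, 0), (-1, 0)]
--
--
-- def get_loc(N):
--     if N < 0:
--         return (0, 0)
--     return _TABLE[N % 16]
-- ===== Notes on version B (the rewrite author's own statement) =====
-- stated objective: faster
-- what changed: Replaces the N-step simulation loop by a 16-entry lookup table indexed by N mod 16, exploiting the walk's 16-step period with zero net displacement.
import Mathlib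
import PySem

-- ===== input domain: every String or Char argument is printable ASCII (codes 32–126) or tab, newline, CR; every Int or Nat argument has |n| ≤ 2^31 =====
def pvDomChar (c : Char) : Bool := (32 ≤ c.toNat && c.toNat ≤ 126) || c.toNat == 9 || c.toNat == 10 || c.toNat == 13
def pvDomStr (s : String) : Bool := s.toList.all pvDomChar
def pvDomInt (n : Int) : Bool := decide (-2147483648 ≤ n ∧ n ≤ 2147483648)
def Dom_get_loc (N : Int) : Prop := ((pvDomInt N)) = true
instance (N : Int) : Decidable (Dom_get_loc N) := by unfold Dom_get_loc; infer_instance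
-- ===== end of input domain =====

-- B replaces A's O(N) step-by-step simulation by an O(1) lookup in a 16-entry table
-- (the walk has period 16 with zero net displacement); return values agree for all N.

-- ===== PORT A =====
-- one iteration of A's loop; state = (current_dir, x, y), i is the loop index
def stepA (s : Int × Int × Int) (i : Int) : Int × Int × Int :=
  let d := (PySem.List.pyGet? [((0:Int),(1:Int)), (-1,0), (0,-1), (1,0)]
            (PySem.Int.mod s.1 4)).getD (0, 0)
  let x := s.2.1 + d.1
  let y := s.2.2 + d.2
  let cd := if PySem.Int.mod i 2 = 0 ∧
               (PySem.Int.mod (PySem.Int.floordiv i 2) 4 = 0 ∨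
                PySem.Int.mod (PySem.Int.floordiv i 2) 4 = 2)
            then PySem.Int.mod (s.1 + 1) 4 else s.1
  (cd, x, y)

def get_loc (N : Int) : Int × Int :=
  let s := (PySem.List.pyRange 1 (N + 1) 1).foldl stepA (0, 0, 0)
  (s.2.1, s.2.2)

-- ===== PORT B =====
def tableB : List (Int × Int) :=
  [(0, 0), (0, 1), (0, 2), (0, 3), (0, 4), (-1, 4), (-2, 4), (-3, 4),
   (-4, 4), (-4, 3), (-4, 2), (-4, 1), (-4, 0), (-3, 0), (-2, 0), (-1, 0)]

def get_loc_alt (N : Int) : Int × Int :=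
  if N < 0 then (0, 0)
  else (PySem.List.pyGet? tableB (PySem.Int.mod N 16)).getD (0, 0)

-- ===== PRECONDITION & SPEC =====
def Spec_get_loc (N : Int) (out : Int × Int) : Prop := out = get_loc_alt N
instance (N : Int) (out : Int × Int) : Decidable (Spec_get_loc N out) := by unfold Spec_get_loc; infer_instance

-- ===== CLAIM (what is proved, stated in full; the proofs are below) =====
def Claim_equal_get_loc : Prop := ∀ (N : Int), Dom_get_loc N → Spec_get_loc N (get_loc N)

-- ===== LEMMAS AND PROOFS =====

-- A's loop state after n steps (loop index i = step count)
def fA : Nat → Int × Int × Int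
  | 0 => (0, 0, 0)
  | n + 1 => stepA (fA n) ((n : Int) + 1)

theorem fold_eq_fA (n : Nat) :
    (PySem.List.pyRange 1 ((n : Int) + 1) 1).foldl stepA (0, 0, 0) = fA n := by
  induction n with
  | zero => simp [PySem.List.pyRange_one_eq_nil, fA]
  | succ m ih =>
      have h : PySem.List.pyRange 1 ((m : Int) + 1 + 1) 1 =
          PySem.List.pyRange 1 ((m : Int) + 1) 1 ++ [(m : Int) + 1] := by
        have := PySem.List.pyRange_one_succ_right (a := 1) (b := (m : Int) + 1) (by omega)
        simpa using this
      push_cast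
      rw [h, List.foldl_append, ih]
      simp [fA]

theorem stepA_shift (s : Int × Int × Int) (i : Int) :
    stepA s (i + 16) = stepA s i := by
  unfold stepA
  have e2 : PySem.Int.mod (i + 16) 2 = PySem.Int.mod i 2 := by
    rw [PySem.Int.mod_eq_emod_of_pos (by norm_num),
        PySem.Int.mod_eq_emod_of_pos (by norm_num)]
    omega
  have ed : PySem.Int.floordiv (i + 16) 2 = PySem.Int.floordiv i 2 + 8 := by
    rw [PySem.Int.floordiv_eq_ediv_of_pos (by norm_num),
        PySem.Int.floordiv_eq_ediv_of_pos (by norm_num)]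
    omega
  have e4 : PySem.Int.mod (PySem.Int.floordiv i 2 + 8) 4
      = PySem.Int.mod (PySem.Int.floordiv i 2) 4 := by
    rw [PySem.Int.mod_eq_emod_of_pos (by norm_num),
        PySem.Int.mod_eq_emod_of_pos (by norm_num)]
    omega
  rw [e2, ed, e4]

theorem fA_period (n : Nat) : fA (n + 16) = fA n := by
  induction n with
  | zero => decide
  | succ m ih =>
      show stepA (fA (m + 16)) ((((m + 16) : Nat) : Int) + 1) = stepA (fA m) ((m : Int) + 1)
      rw [ih]
      have : (((m + 16) : Nat) : Int) + 1 = ((m : Int) + 1) + 16 := by push_cast; ring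
      rw [this, stepA_shift]

theorem fA_mod (n : Nat) : fA n = fA (n % 16) := by
  induction n using Nat.strong_induction_on with
  | _ n ih =>
    by_cases h : n < 16
    · rw [Nat.mod_eq_of_lt h]
    · obtain ⟨m, rfl⟩ : ∃ m, n = m + 16 := ⟨n - 16, by omega⟩
      rw [fA_period, ih m (by omega), Nat.add_mod_right]

-- ===== VERDICT (by name: the statement is the Claim_ definition above) =====
theorem get_loc_spec : Claim_equal_get_loc := by
  intro N _
  show get_loc N = get_loc_alt N
  by_cases hN : N < 0
  · have : PySem.List.pyRange 1 (N + 1) 1 = [] :=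
      PySem.List.pyRange_one_eq_nil (by omega)
    simp [get_loc, get_loc_alt, this, hN]
  · obtain ⟨n, rfl⟩ : ∃ n : Nat, N = (n : Int) := ⟨N.toNat, by omega⟩
    rw [get_loc, get_loc_alt, if_neg hN, fold_eq_fA, fA_mod]
    have hm : PySem.Int.mod (n : Int) 16 = ((n % 16 : Nat) : Int) := by
      exact_mod_cast PySem.Int.mod_natCast n 16
    rw [hm]
    have hlt : n % 16 < 16 := Nat.mod_lt _ (by norm_num)
    interval_cases h : n % 16 <;> decide
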